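-- pv_equiv track=rewrite | github.com/lamoboos223/citus-sharding | citus-example.py | grouped_colocation
-- ===== SOURCE A (Python) =====
-- def grouped_colocation(ranges):
--     groups = {}
--     for (tbl, sid), rng in ranges.items():
--         groups.setdefault(rng, {}).setdefault(tbl, sid)
--     ordered = []
--     for idx, (rng, mapping) in enumerate(sorted(groups.items(), key=lambda x: x[0])):
--         ordered.append((idx+1, mapping))  # (group_no, {'rooms':sid, 'room_members':sid, 'messages':sid})
--     return ordered
-- ===== SOURCE B (Python) =====
-- def grouped_colocation(ranges):
--     rngs = sorted(set(ranges.values()))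
--     out = []
--     for i, r in enumerate(rngs, 1):
--         mapping = {}
--         for (tbl, sid), rng in ranges.items():
--             if rng == r and tbl not in mapping:
--                 mapping[tbl] = sid
--         out.append((i, mapping))
--     return out
-- ===== Notes on version B (the rewrite author's own statement) =====
-- stated objective: alternative
-- what changed: B never builds the dict-of-dicts: it sorts the distinct range values up front and then builds each group's first-wins mapping by a direct filtered pass over the items, numbering groups as it goes, instead of accumulating a nested dict, sorting its items and re-enumerating.
import Mathlib
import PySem

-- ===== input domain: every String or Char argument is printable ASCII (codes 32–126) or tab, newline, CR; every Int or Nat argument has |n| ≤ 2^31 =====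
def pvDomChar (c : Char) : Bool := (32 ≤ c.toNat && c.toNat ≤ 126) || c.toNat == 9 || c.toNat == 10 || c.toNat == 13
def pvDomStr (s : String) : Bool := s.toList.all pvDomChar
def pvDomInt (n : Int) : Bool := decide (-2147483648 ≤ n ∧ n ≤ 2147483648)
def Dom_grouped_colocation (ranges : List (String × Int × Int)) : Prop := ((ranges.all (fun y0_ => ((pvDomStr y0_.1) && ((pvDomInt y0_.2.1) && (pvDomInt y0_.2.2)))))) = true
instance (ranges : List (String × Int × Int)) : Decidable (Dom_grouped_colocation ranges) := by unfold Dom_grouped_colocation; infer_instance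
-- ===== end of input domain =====

-- B replaces A's build-nested-dict-then-sort-then-enumerate by: sort the distinct range
-- values first, then build each group's first-wins mapping by a filtered pass, numbering
-- groups as it goes (objective: alternative decomposition, similar cost).

-- ===== PORT A =====
-- 'groups.setdefault(rng, {}).setdefault(tbl, sid)' = modify groups at rng (default {})
-- by an inner setdefault; ranges.items() is the association list itself.
def grouped_colocation (ranges : List (String × Int × Int)) : List (Int × (List (String × Int))) :=
  let groups : PySem.Dict Int (PySem.Dict String Int) :=
    ranges.foldl
      (fun g x => g.modify x.2.2 PySem.Dict.empty (fun m => m.setdefault x.1 x.2.1))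
      PySem.Dict.empty
  let ordered : List (Int × (List (String × Int))) :=
    (PySem.List.enumerate (PySem.List.sorted groups.items (fun p => p.1)) 0).foldl
      (fun acc p => acc ++ [(p.1 + 1, p.2.2.items)]) []
  ordered

-- ===== PORT B =====
-- inner loop: 'if rng == r and tbl not in mapping: mapping[tbl] = sid'
def pvMappingFor (ranges : List (String × Int × Int)) (r : Int) : PySem.Dict String Int :=
  ranges.foldl
    (fun m x => if x.2.2 == r && !(m.contains x.1) then m.insert x.1 x.2.1 else m)
    PySem.Dict.empty

def grouped_colocation_alt (ranges : List (String × Int × Int)) : List (Int × (List (String × Int))) :=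
  let rngs : List Int := PySem.List.sorted (PySem.Set.ofList (ranges.map (fun x => x.2.2))) (fun x => x)
  (PySem.List.enumerate rngs 1).foldl
    (fun acc p => acc ++ [(p.1, (pvMappingFor ranges p.2).items)]) []

-- ===== PRECONDITION & SPEC =====
def Spec_grouped_colocation (ranges : List (String × Int × Int)) (out : List (Int × (List (String × Int)))) : Prop := out = grouped_colocation_alt ranges
instance (ranges : List (String × Int × Int)) (out : List (Int × (List (String × Int)))) : Decidable (Spec_grouped_colocation ranges out) := by unfold Spec_grouped_colocation; infer_instance

-- ===== CLAIM (what is proved, stated in full; the proofs are below) =====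
def Claim_equal_grouped_colocation : Prop := ∀ (ranges : List (String × Int × Int)), Dom_grouped_colocation ranges → Spec_grouped_colocation ranges (grouped_colocation ranges)

-- ===== LEMMAS AND PROOFS =====

-- A's group at r is the setdefault-fold over the items whose range is r
theorem pv_getD_groups (l : List (String × Int × Int)) (g : PySem.Dict Int (PySem.Dict String Int)) (r : Int) :
    (l.foldl (fun g x => g.modify x.2.2 PySem.Dict.empty (fun m => m.setdefault x.1 x.2.1)) g).getD r PySem.Dict.empty
      = (l.filter (fun x => x.2.2 == r)).foldl (fun m x => m.setdefault x.1 x.2.1) (g.getD r PySem.Dict.empty) := by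
  induction l generalizing g with
  | nil => rfl
  | cons x t ih =>
    simp only [List.foldl_cons, List.filter_cons, ih, PySem.Dict.getD_modify]
    by_cases h : x.2.2 = r
    · simp [h]
    · have h' : ¬ r = x.2.2 := fun hr => h hr.symm
      simp [h, h']

-- B's first-wins loop is the same setdefault-fold over the same filtered items
theorem pv_mapping_eq_setdefault_fold (l : List (String × Int × Int)) (m : PySem.Dict String Int) (r : Int) :
    l.foldl (fun m x => if x.2.2 == r && !(m.contains x.1) then m.insert x.1 x.2.1 else m) m
      = (l.filter (fun x => x.2.2 == r)).foldl (fun m x => m.setdefault x.1 x.2.1) m := by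
  induction l generalizing m with
  | nil => rfl
  | cons x t ih =>
    simp only [List.foldl_cons, List.filter_cons, ih]
    by_cases h : (x.2.2 == r) = true
    · by_cases hc : m.contains x.1 = true
      · simp [h, hc, PySem.Dict.setdefault_of_contains m _ hc]
      · have hc' : m.contains x.1 = false := by simpa using hc
        simp [h, hc', PySem.Dict.setdefault_of_not_contains m _ hc']
    · have hb : (x.2.2 == r) = false := by simpa using h
      simp [hb]

-- the enumerate-and-renumber shape shared by both outputs
theorem pv_enumerate_map_shift {α β γ : Type} (g : α → β) (h1 : Int × β → γ) (h2 : Int × α → γ)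
    (l : List α) (s : Int) (hh : ∀ i a, h1 (i, g a) = h2 (i + 1, a)) :
    (PySem.List.enumerate (l.map g) s).map h1 = (PySem.List.enumerate l (s + 1)).map h2 := by
  induction l generalizing s with
  | nil => rfl
  | cons x t ih =>
    simp only [List.map_cons, PySem.List.enumerate_cons, List.map_cons, ih, hh s x]

theorem pv_main (ranges : List (String × Int × Int)) :
    grouped_colocation ranges = grouped_colocation_alt ranges := by
  unfold grouped_colocation grouped_colocation_alt
  simp only [PySem.List.foldl_append_singleton_eq_map, List.nil_append]
  set G : PySem.Dict Int (PySem.Dict String Int) :=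
    ranges.foldl (fun g x => g.modify x.2.2 PySem.Dict.empty (fun m => m.setdefault x.1 x.2.1))
      PySem.Dict.empty with hG
  set rngs : List Int := PySem.List.sorted (PySem.Set.ofList (ranges.map (fun x => x.2.2))) (fun x => x) with hrngs
  have hkeys : G.keys = PySem.Set.ofList (ranges.map (fun x => x.2.2)) := by
    rw [hG, PySem.Dict.keys_foldl_modify_key ranges (fun x => x.2.2) PySem.Dict.empty
      (fun _ x => (fun m => m.setdefault x.1 x.2.1)) PySem.Dict.empty]
    rfl
  have hnd : G.keys.Nodup := by
    rw [hG]
    exact PySem.Dict.nodup_keys_foldl_modify_key ranges (fun x => x.2.2) PySem.Dict.empty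
      (fun _ x => (fun m => m.setdefault x.1 x.2.1)) PySem.Dict.empty (by simp)
  have hmap : ∀ r, pvMappingFor ranges r = G.getD r PySem.Dict.empty := by
    intro r
    rw [pvMappingFor, pv_mapping_eq_setdefault_fold, hG, pv_getD_groups]
    rfl
  have hsorted : PySem.List.sorted G.items (fun p => p.1)
      = rngs.map (fun r => (r, G.getD r PySem.Dict.empty)) := by
    apply PySem.List.sorted_eq_of_perm_of_pairwise_lt
    · have hperm : rngs.Perm G.keys := by
        rw [hkeys, hrngs]; exact PySem.List.sorted_perm _ _ _
      have := hperm.map (fun r => (r, G.getD r PySem.Dict.empty))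
      rw [PySem.Dict.items_eq_map_keys G hnd PySem.Dict.empty]
      exact this
    · have hp : rngs.Pairwise (fun a b => a < b) := by
        rw [hrngs]; exact PySem.List.sorted_ofList_pairwise_lt _
      exact (List.pairwise_map).2 hp
  rw [hsorted]
  have hshift := pv_enumerate_map_shift (fun r => (r, G.getD r PySem.Dict.empty))
    (fun p => (p.1 + 1, p.2.2.items)) (fun p => (p.1, (pvMappingFor ranges p.2).items))
    rngs 0 (fun i a => by simp [hmap])
  simpa using hshift

-- ===== VERDICT (by name: the statement is the Claim_ definition above) =====
theorem grouped_colocation_spec : Claim_equal_grouped_colocation := by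
  intro ranges _
  exact pv_main ranges
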